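-- pv_equiv track=rewrite | github.com/OnlyCook/abitur-elite-code | create-plantuml-diagrams.py | add_blueprint_theme
-- ===== SOURCE A (Python) =====
-- def add_blueprint_theme(plantuml_source):
--     if not plantuml_source: return ""
--     if '!theme' not in plantuml_source:
--         lines = plantuml_source.split('\n')
--         new_lines = []
--         for line in lines:
--             new_lines.append(line)
--             if line.strip().startswith('@startuml'):
--                 new_lines.append('!theme blueprint')
--         return '\n'.join(new_lines)
--     return plantuml_source
-- ===== SOURCE B (Python) =====
-- def add_blueprint_theme(plantuml_source):
--     # single character-level pass: a small automaton per line instead of split/strip/join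
--     if not plantuml_source: return ""
--     if '!theme' in plantuml_source: return plantuml_source
--     target = '@startuml'
--     out = []
--     state = 0  # 0 = in leading whitespace, 1..8 = matched that many target chars, 9 = line qualifies, -1 = line cannot qualify
--     for ch in plantuml_source:
--         if ch == '\n':
--             if state == 9:
--                 out.append('\n!theme blueprint')
--             out.append('\n')
--             state = 0
--         else:
--             out.append(ch)
--             if state == 0 and ch in ' \t\r\f\v':
--                 pass
--             elif 0 <= state < 9 and ch == target[state]:
--                 state += 1
--             elif state == 9:
--                 pass
--             else:
--                 state = -1
--     if state == 9:
--         out.append('\n!theme blueprint')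
--     return ''.join(out)
-- ===== Notes on version B (the rewrite author's own statement) =====
-- stated objective: alternative
-- what changed: Replaces the line-splitting, per-line strip().startswith check, list append and join of A with a single character-level pass that runs a small prefix-matching automaton per line and emits the theme line at each line end.
import Mathlib
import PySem

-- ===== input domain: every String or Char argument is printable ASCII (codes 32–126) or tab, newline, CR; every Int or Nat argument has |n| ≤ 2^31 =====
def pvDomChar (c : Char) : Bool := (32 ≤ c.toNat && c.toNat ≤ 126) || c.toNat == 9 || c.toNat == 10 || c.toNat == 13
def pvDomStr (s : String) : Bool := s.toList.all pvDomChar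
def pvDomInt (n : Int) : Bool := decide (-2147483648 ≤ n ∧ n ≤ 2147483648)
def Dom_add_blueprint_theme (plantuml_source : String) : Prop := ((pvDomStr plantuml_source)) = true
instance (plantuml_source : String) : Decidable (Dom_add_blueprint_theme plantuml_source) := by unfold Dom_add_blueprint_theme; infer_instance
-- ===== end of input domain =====

-- B replaces A's split('\n')/per-line strip().startswith/append/join processing by a single
-- character-level pass running a small prefix-matching automaton per line (objective: alternative).

-- ===== PORT A =====
def add_blueprint_theme (plantuml_source : String) : String :=
  if plantuml_source.toList = [] then "" else
  if ¬ (PySem.Str.isIn "!theme" plantuml_source = true) then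
    let lines := PySem.Chars.splitOn plantuml_source.toList ['\n']
    let new_lines := lines.foldl (fun acc line =>
      let acc' := acc ++ [line]
      if PySem.Chars.startswith (PySem.Chars.strip line) "@startuml".toList = true
      then acc' ++ ["!theme blueprint".toList] else acc') []
    String.mk (PySem.Chars.join ['\n'] new_lines)
  else plantuml_source

-- ===== PORT B =====
-- automaton step for one non-newline character (B's inner if/elif chain; state: 0 = in leading
-- whitespace, 1..8 = matched that many chars of '@startuml', 9 = line qualifies, -1 = it cannot)
def pvNextSt (st : Int) (ch : Char) : Int :=
  if st = 0 ∧ ch ∈ " \t\r\x0c\x0b".toList then st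
  else if (0 ≤ st ∧ st < 9) ∧ PySem.Str.pyGet? "@startuml" st = some ch then st + 1
  else if st = 9 then st
  else -1

-- one step of B's loop: emit the char (and at a newline, the theme line if the line qualified)
def pvStep (acc : List Char × Int) (ch : Char) : List Char × Int :=
  if ch = '\n' then
    ((if acc.2 = 9 then acc.1 ++ ('\n' :: "!theme blueprint".toList) else acc.1) ++ ['\n'], 0)
  else (acc.1 ++ [ch], pvNextSt acc.2 ch)

def add_blueprint_theme_alt (plantuml_source : String) : String :=
  if plantuml_source.toList = [] then "" else
  if PySem.Str.isIn "!theme" plantuml_source = true then plantuml_source else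
    let r := plantuml_source.toList.foldl pvStep ([], 0)
    String.mk (if r.2 = 9 then r.1 ++ ('\n' :: "!theme blueprint".toList) else r.1)

-- ===== PRECONDITION & SPEC =====
def Spec_add_blueprint_theme (plantuml_source : String) (out : String) : Prop := out = add_blueprint_theme_alt plantuml_source
instance (plantuml_source : String) (out : String) : Decidable (Spec_add_blueprint_theme plantuml_source out) := by unfold Spec_add_blueprint_theme; infer_instance

-- ===== CLAIM (what is proved, stated in full; the proofs are below) =====
def Claim_equal_add_blueprint_theme : Prop := ∀ (plantuml_source : String), Dom_add_blueprint_theme plantuml_source → Spec_add_blueprint_theme plantuml_source (add_blueprint_theme plantuml_source)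

-- ===== LEMMAS AND PROOFS =====

def pvTgt : List Char := "@startuml".toList

-- clean structural recursion computing split('\n')
def pvSplit : List Char → List (List Char)
  | [] => [[]]
  | c :: rest =>
    if c = '\n' then [] :: pvSplit rest
    else match pvSplit rest with
      | [] => [[c]]
      | h :: t => (c :: h) :: t

theorem pvSplit_ne_nil (cs : List Char) : pvSplit cs ≠ [] := by
  cases cs with
  | nil => simp [pvSplit]
  | cons c rest =>
    simp only [pvSplit]
    split
    · simp
    · split <;> simp

def pvMapHead (f : List Char → List Char) : List (List Char) → List (List Char)
  | [] => []
  | h :: t => f h :: t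

theorem pvGo_eq (fuel : Nat) : ∀ (l cur : List Char) (acc : List (List Char)), l.length < fuel →
    PySem.Chars.splitOn.go ['\n'] fuel l cur acc
      = acc.reverse ++ pvMapHead (cur.reverse ++ ·) (pvSplit l) := by
  induction fuel with
  | zero => intro l cur acc h; omega
  | succ n ih =>
    intro l cur acc h
    rw [PySem.Chars.splitOn.go.eq_def]
    cases l with
    | nil => simp [pvSplit, pvMapHead]
    | cons c rest =>
      by_cases hc : c = '\n'
      · subst hc
        simp only [List.isPrefixOf, List.length_cons] at *
        rw [if_pos (by simp)]
        rw [ih _ _ _ (by simpa using by omega)]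
        have hne := pvSplit_ne_nil rest
        cases hrep : pvSplit rest with
        | nil => exact absurd hrep hne
        | cons h t => simp [pvSplit, pvMapHead, hrep]
      · simp only [List.isPrefixOf, List.length_cons] at *
        rw [if_neg (by simp [Ne.symm hc])]
        rw [ih _ _ _ (by omega)]
        have hne := pvSplit_ne_nil rest
        cases hrep : pvSplit rest with
        | nil => exact absurd hrep hne
        | cons h t => simp [pvSplit, pvMapHead, hrep, hc]

theorem pvSplitOn_eq (cs : List Char) :
    PySem.Chars.splitOn cs ['\n'] = pvSplit cs := by
  unfold PySem.Chars.splitOn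
  rw [pvGo_eq _ _ _ _ (by omega)]
  have hne := pvSplit_ne_nil cs
  cases hrep : pvSplit cs with
  | nil => exact absurd hrep hne
  | cons h t => simp [pvMapHead]

theorem pvSplit_of_not_mem (cs : List Char) (h : '\n' ∉ cs) : pvSplit cs = [cs] := by
  induction cs with
  | nil => rfl
  | cons c rest ih =>
    simp only [List.mem_cons, not_or] at h
    simp [pvSplit, Ne.symm h.1, ih h.2]

theorem pvSplit_append (l rest : List Char) (h : '\n' ∉ l) :
    pvSplit (l ++ '\n' :: rest) = l :: pvSplit rest := by
  induction l with
  | nil => simp [pvSplit]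
  | cons c t ih =>
    simp only [List.mem_cons, not_or] at h
    simp [pvSplit, Ne.symm h.1, ih h.2]

theorem pvJoin_append (sep : List Char) (a b : List (List Char)) (ha : a ≠ []) (hb : b ≠ []) :
    PySem.Chars.join sep (a ++ b) = PySem.Chars.join sep a ++ sep ++ PySem.Chars.join sep b := by
  induction a with
  | nil => exact absurd rfl ha
  | cons x xs ih =>
    cases xs with
    | nil =>
      cases b with
      | nil => exact absurd rfl hb
      | cons y ys => simp [PySem.Chars.join_cons_cons, PySem.Chars.join_singleton]
    | cons z zs =>
      rw [List.cons_append, List.cons_append, PySem.Chars.join_cons_cons,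
        PySem.Chars.join_cons_cons, ← List.cons_append, ih (by simp)]
      simp [List.append_assoc]

theorem pvFoldl_line (l : List Char) (h : '\n' ∉ l) :
    ∀ (out : List Char) (st : Int),
    l.foldl pvStep (out, st) = (out ++ l, l.foldl pvNextSt st) := by
  induction l with
  | nil => simp
  | cons c rest ih =>
    simp only [List.mem_cons, not_or] at h
    intro out st
    rw [List.foldl_cons, pvStep, if_neg (fun hh => h.1 hh.symm), ih h.2]
    simp

theorem pvNextSt_neg_one (c : Char) : pvNextSt (-1) c = -1 := by
  simp [pvNextSt]

theorem pvFoldl_neg_one (l : List Char) : l.foldl pvNextSt (-1) = -1 := by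
  induction l with
  | nil => rfl
  | cons c rest ih => simpa [pvNextSt_neg_one] using ih

theorem pvFoldl_nine (l : List Char) : l.foldl pvNextSt 9 = 9 := by
  induction l with
  | nil => rfl
  | cons c rest ih => simpa [pvNextSt] using ih

theorem pvNextSt_match (k : Nat) (c : Char) (h1 : 1 ≤ k) (hk9 : k < 9) (hc : pvTgt[k]! = c) :
    pvNextSt (k : Int) c = ((k + 1 : Nat) : Int) := by
  rw [pvNextSt, if_neg (by push_cast; omega), if_pos]
  · push_cast; ring
  · refine ⟨⟨by positivity, by exact_mod_cast hk9⟩, ?_⟩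
    rw [PySem.Str.pyGet?_natCast]
    have : k < pvTgt.length := by simp [pvTgt]; omega
    rw [show "@startuml".toList = pvTgt from rfl, List.getElem?_eq_getElem this,
      ← hc, List.getElem!_eq_getElem?_getD, List.getElem?_eq_getElem this]
    rfl

theorem pvNextSt_mismatch (k : Nat) (c : Char) (h1 : 1 ≤ k) (hk9 : k < 9) (hc : ¬ pvTgt[k]! = c) :
    pvNextSt (k : Int) c = -1 := by
  rw [pvNextSt, if_neg (by push_cast; omega), if_neg, if_neg (by push_cast; omega)]
  intro ⟨_, hget⟩
  rw [PySem.Str.pyGet?_natCast] at hget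
  have hlt : k < pvTgt.length := by simp [pvTgt]; omega
  rw [show "@startuml".toList = pvTgt from rfl, List.getElem?_eq_getElem hlt] at hget
  apply hc
  rw [List.getElem!_eq_getElem?_getD, List.getElem?_eq_getElem hlt]
  simpa using hget

theorem pvMatch (l : List Char) : ∀ (k : Nat), 1 ≤ k → k ≤ 9 →
    (l.foldl pvNextSt (k : Int) = 9 ↔ pvTgt.drop k <+: l) := by
  induction l with
  | nil =>
    intro k h1 h9
    simp only [List.foldl_nil, List.prefix_nil]
    constructor
    · intro h
      have : k = 9 := by exact_mod_cast h
      simp [this, pvTgt]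
    · intro h
      have h2 := List.length_drop (l := pvTgt) (i := k)
      rw [h] at h2
      have : pvTgt.length = 9 := by decide
      rw [this] at h2
      have : k = 9 := by simp at h2; omega
      exact_mod_cast congrArg (Nat.cast : Nat → Int) this
  | cons c rest ih =>
    intro k h1 h9
    by_cases h9' : k = 9
    · subst h9'
      rw [List.foldl_cons, show ((9:Nat):Int) = (9:Int) by norm_num,
        show pvNextSt 9 c = 9 by simp [pvNextSt], pvFoldl_nine]
      simp [pvTgt]
    · have hk9 : k < 9 := by omega
      have hlt : k < pvTgt.length := by simp [pvTgt]; omega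
      have hdrop : pvTgt.drop k = pvTgt[k] :: pvTgt.drop (k+1) := List.drop_eq_getElem_cons hlt
      by_cases hc : pvTgt[k]! = c
      · rw [List.foldl_cons, pvNextSt_match k c h1 hk9 hc, ih (k+1) (by omega) (by omega), hdrop]
        have : pvTgt[k] = c := by
          rw [← hc, List.getElem!_eq_getElem?_getD, List.getElem?_eq_getElem hlt]; rfl
        rw [this]
        exact ⟨fun hp => (List.cons_prefix_cons).mpr ⟨rfl, hp⟩,
          fun hp => ((List.cons_prefix_cons).mp hp).2⟩
      · rw [List.foldl_cons, pvNextSt_mismatch k c h1 hk9 hc, pvFoldl_neg_one, hdrop]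
        have hne : pvTgt[k] ≠ c := by
          intro hh; apply hc
          rw [List.getElem!_eq_getElem?_getD, List.getElem?_eq_getElem hlt]; exact hh
        constructor
        · intro h; exact absurd h (by norm_num)
        · intro hp
          exact absurd ((List.cons_prefix_cons).mp hp).1 hne

theorem pvChar_eq_of_toNat (a b : Char) (h : a.toNat = b.toNat) : a = b := by
  have := congrArg Char.ofNat h
  simpa [Char.ofNat_toNat] using this

theorem pvWs_isspace (c : Char) (hm : c ∈ " \t\r\x0c\x0b".toList) :
    PySem.Chars.isspace c = true := by
  simp only [show (" \t\r\x0c\x0b".toList) = [' ', '\t', '\r', '\x0c', '\x0b'] from rfl,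
    List.mem_cons, List.not_mem_nil, or_false] at hm
  rcases hm with h|h|h|h|h <;> subst h <;> decide

theorem pvNotWs_isspace (c : Char) (hd : pvDomChar c = true) (hn : c ≠ '\n')
    (hm : c ∉ " \t\r\x0c\x0b".toList) : PySem.Chars.isspace c = false := by
  simp only [show (" \t\r\x0c\x0b".toList) = [' ', '\t', '\r', '\x0c', '\x0b'] from rfl,
    List.mem_cons, List.not_mem_nil, or_false, not_or] at hm
  obtain ⟨h1, h2, h3, _, _⟩ := hm
  have e1 : c.toNat ≠ 32 := fun h => h1 (pvChar_eq_of_toNat _ _ h)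
  have e2 : c.toNat ≠ 9 := fun h => h2 (pvChar_eq_of_toNat _ _ h)
  have e3 : c.toNat ≠ 13 := fun h => h3 (pvChar_eq_of_toNat _ _ h)
  have e4 : c.toNat ≠ 10 := fun h => hn (pvChar_eq_of_toNat _ _ h)
  simp only [pvDomChar, Bool.or_eq_true, Bool.and_eq_true, decide_eq_true_eq, beq_iff_eq] at hd
  simp only [PySem.Chars.isspace, Bool.or_eq_false_iff, Bool.and_eq_false_iff,
    decide_eq_false_iff_not, decide_eq_true_eq]
  omega

theorem pvDropWhile_congr (l : List Char) (p q : Char → Bool) (h : ∀ c ∈ l, p c = q c) :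
    l.dropWhile p = l.dropWhile q := by
  induction l with
  | nil => rfl
  | cons c r ih =>
    simp only [List.dropWhile_cons, h c (by simp)]
    split
    · exact ih (fun x hx => h x (by simp [hx]))
    · rfl

theorem pvRstrip_decomp (m : List Char) :
    PySem.Chars.rstrip m ++ (List.takeWhile PySem.Chars.isspace m.reverse).reverse = m := by
  unfold PySem.Chars.rstrip
  rw [← List.reverse_append, List.takeWhile_append_dropWhile, List.reverse_reverse]

theorem pvTgt_not_isspace : ∀ c ∈ pvTgt, PySem.Chars.isspace c = false := by
  intro c hc
  rw [show pvTgt = ['@','s','t','a','r','t','u','m','l'] from rfl] at hc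
  simp only [List.mem_cons, List.not_mem_nil, or_false] at hc
  rcases hc with h|h|h|h|h|h|h|h|h <;> subst h <;>
    simp only [PySem.Chars.isspace, show Char.toNat '@' = 64 from rfl,
      show Char.toNat 's' = 115 from rfl, show Char.toNat 't' = 116 from rfl,
      show Char.toNat 'a' = 97 from rfl, show Char.toNat 'r' = 114 from rfl,
      show Char.toNat 'u' = 117 from rfl, show Char.toNat 'm' = 109 from rfl,
      show Char.toNat 'l' = 108 from rfl] <;> norm_num

theorem pvRstrip_prefix (m : List Char) :
    (pvTgt <+: PySem.Chars.rstrip m) ↔ pvTgt <+: m := by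
  set w := (List.takeWhile PySem.Chars.isspace m.reverse).reverse with hw
  have hm : PySem.Chars.rstrip m ++ w = m := pvRstrip_decomp m
  constructor
  · intro h; exact h.trans ⟨w, hm⟩
  · intro hp
    by_cases hlen : 9 ≤ (PySem.Chars.rstrip m).length
    · have htake : pvTgt = List.take 9 m := by
        have := List.prefix_iff_eq_take.mp hp
        simpa [show pvTgt.length = 9 from rfl] using this
      rw [← hm, List.take_append_of_le_length hlen] at htake
      rw [htake]
      exact List.take_prefix _ _
    · exfalso
      push_neg at hlen
      set j := (PySem.Chars.rstrip m).length with hj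
      have hml : 9 ≤ m.length := by
        have := hp.length_le; simpa [show pvTgt.length = 9 from rfl] using this
      have hjm : j < m.length := by omega
      have hgm : m[j] = pvTgt[j]'(by simp [pvTgt]; omega) := (hp.getElem (by simp [pvTgt]; omega)).symm
      have hwne : j < (PySem.Chars.rstrip m ++ w).length := by rw [hm]; exact hjm
      have hw0 : 0 < w.length := by
        have := congrArg List.length hm
        simp at this; omega
      have hgw : m[j] = w[0] := by
        rw [← List.getElem_of_eq hm hwne, List.getElem_append_right (by omega)]
        congr 1; omega
      have hsp : PySem.Chars.isspace m[j] = true := by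
        rw [hgw]
        apply List.mem_takeWhile_imp (l := m.reverse)
        have : w[0] ∈ w := List.getElem_mem _
        simpa [hw] using this
      rw [hgm, pvTgt_not_isspace _ (List.getElem_mem _)] at hsp
      exact Bool.false_ne_true hsp

-- entry: from state 0 the automaton reaches 9 iff the target is a prefix after leading whitespace
theorem pvEntry (l : List Char) : (∀ c ∈ l, pvDomChar c = true) → '\n' ∉ l →
    (l.foldl pvNextSt 0 = 9 ↔ pvTgt <+: l.dropWhile (fun c => decide (c ∈ " \t\r\x0c\x0b".toList))) := by
  induction l with
  | nil =>
    intro _ _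
    simp [pvTgt]
  | cons c r ih =>
    intro hdom hnl
    simp only [List.mem_cons, not_or] at hnl
    by_cases cw : c ∈ " \t\r\x0c\x0b".toList
    · rw [List.foldl_cons, show pvNextSt 0 c = 0 by unfold pvNextSt; rw [if_pos ⟨rfl, cw⟩],
        List.dropWhile_cons_of_pos (by simpa using cw)]
      exact ih (fun x hx => hdom x (by simp [hx])) hnl.2
    · rw [List.foldl_cons, List.dropWhile_cons_of_neg (by simpa using cw)]
      by_cases hc : c = '@'
      · subst hc
        rw [show pvNextSt 0 '@' = ((1:Nat):Int) by
            unfold pvNextSt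
            rw [if_neg (fun hh => absurd hh.2 (by decide)),
              if_pos ⟨⟨le_refl 0, by norm_num⟩, rfl⟩]
            norm_num,
          pvMatch r 1 (by omega) (by omega)]
        rw [show pvTgt = '@' :: pvTgt.drop 1 from rfl]
        exact ⟨fun hp => (List.cons_prefix_cons).mpr ⟨rfl, hp⟩,
          fun hp => ((List.cons_prefix_cons).mp hp).2⟩
      · rw [show pvNextSt 0 c = -1 by
            unfold pvNextSt
            rw [if_neg (fun hh => cw hh.2), if_neg, if_neg (by norm_num)]
            intro ⟨_, hg⟩
            rw [show PySem.Str.pyGet? "@startuml" 0 = some '@' from rfl] at hg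
            exact hc (Option.some.inj hg).symm,
          pvFoldl_neg_one]
        rw [show pvTgt = '@' :: pvTgt.drop 1 from rfl]
        constructor
        · intro h; exact absurd h (by norm_num)
        · intro hp
          exact absurd ((List.cons_prefix_cons).mp hp).1 (fun hh => hc hh.symm)

-- A's per-line test agrees with the automaton's final state on Dom lines
theorem pvPred_iff (l : List Char) (hdom : ∀ c ∈ l, pvDomChar c = true) (hnl : '\n' ∉ l) :
    (PySem.Chars.startswith (PySem.Chars.strip l) "@startuml".toList = true ↔ l.foldl pvNextSt 0 = 9) := by
  rw [PySem.Chars.startswith_iff, show PySem.Chars.strip l = PySem.Chars.rstrip (PySem.Chars.lstrip l) from rfl]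
  have hls : PySem.Chars.lstrip l = l.dropWhile (fun c => decide (c ∈ " \t\r\x0c\x0b".toList)) := by
    unfold PySem.Chars.lstrip
    apply pvDropWhile_congr
    intro c hc
    by_cases hm : c ∈ " \t\r\x0c\x0b".toList
    · rw [pvWs_isspace c hm]
      exact (decide_eq_true hm).symm
    · rw [pvNotWs_isspace c (hdom c hc) (fun hh => hnl (hh ▸ hc)) hm]
      exact (decide_eq_false hm).symm
  rw [hls, show "@startuml".toList = pvTgt from rfl, pvRstrip_prefix]
  exact (pvEntry l hdom hnl).symm

def pvPred (line : List Char) : Bool :=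
  PySem.Chars.startswith (PySem.Chars.strip line) "@startuml".toList

def pvG (line : List Char) : List (List Char) :=
  line :: (if pvPred line = true then ["!theme blueprint".toList] else [])

theorem pvDropWhile_head (p : Char → Bool) (cs : List Char) (a : Char) (t : List Char)
    (h : cs.dropWhile p = a :: t) : p a = false := by
  induction cs with
  | nil => simp at h
  | cons c r ih =>
    rw [List.dropWhile_cons] at h
    split at h
    · exact ih h
    · rename_i hpc
      cases h
      simpa using hpc

theorem pvMain (n : Nat) : ∀ (cs : List Char), cs.length ≤ n → (∀ c ∈ cs, pvDomChar c = true) →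
    ∀ out : List Char,
    (if (cs.foldl pvStep (out, 0)).2 = 9
      then (cs.foldl pvStep (out, 0)).1 ++ ('\n' :: "!theme blueprint".toList)
      else (cs.foldl pvStep (out, 0)).1)
    = out ++ PySem.Chars.join ['\n'] ((pvSplit cs).flatMap pvG) := by
  induction n with
  | zero =>
    intro cs hlen _ out
    have : cs = [] := List.length_eq_zero_iff.mp (by omega)
    subst this
    rw [show pvSplit [] = [[]] from rfl,
      show ([[]] : List (List Char)).flatMap pvG = pvG [] from by simp,
      show pvG [] = [[]] from rfl, PySem.Chars.join_singleton]
    simp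
  | succ n ih =>
    intro cs hlen hdom out
    by_cases hmem : '\n' ∈ cs
    · -- cs = l ++ '\n' :: t with '\n' ∉ l
      have hsplit := List.takeWhile_append_dropWhile (p := fun c => !(c == '\n')) (l := cs)
      set l := cs.takeWhile (fun c => !(c == '\n')) with hldef
      set d := cs.dropWhile (fun c => !(c == '\n')) with hddef
      have hdne : d ≠ [] := by
        intro hd
        have := List.dropWhile_eq_nil_iff.mp hd
        have := this '\n' hmem
        simp at this
      have hnll : '\n' ∉ l := by
        intro hl
        have := List.mem_takeWhile_imp hl
        simp at this
      cases hd : d with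
      | nil => exact absurd hd hdne
      | cons a t =>
        have ha : a = '\n' := by
          have := pvDropWhile_head (fun c => !(c == '\n')) cs a t (by rw [← hddef, hd])
          simpa using this
        subst ha
        have hcs : cs = l ++ '\n' :: t := by rw [← hsplit, hd]
        have hlen' : t.length ≤ n := by
          have := congrArg List.length hcs
          simp at this; omega
        have hdoml : ∀ c ∈ l, pvDomChar c = true := fun c hc => hdom c (by rw [hcs]; simp [hc])
        have hdomt : ∀ c ∈ t, pvDomChar c = true := fun c hc => hdom c (by rw [hcs]; simp [hc])
        rw [hcs, List.foldl_append, pvFoldl_line l hnll, List.foldl_cons]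
        rw [show pvStep (out ++ l, l.foldl pvNextSt 0) '\n'
            = ((if l.foldl pvNextSt 0 = 9 then (out ++ l) ++ ('\n' :: "!theme blueprint".toList) else out ++ l) ++ ['\n'], 0)
          from rfl]
        rw [ih t hlen' hdomt _]
        rw [pvSplit_append l t hnll]
        have hFne : (pvSplit t).flatMap pvG ≠ [] := by
          cases hrep : pvSplit t with
          | nil => exact absurd hrep (pvSplit_ne_nil t)
          | cons y ys => simp [pvG]
        rw [show (l :: pvSplit t).flatMap pvG = pvG l ++ (pvSplit t).flatMap pvG from by simp]
        rw [pvJoin_append ['\n'] (pvG l) _ (by simp [pvG]) hFne]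
        by_cases hp : pvPred l = true
        · have h9 : l.foldl pvNextSt 0 = 9 := (pvPred_iff l hdoml hnll).mp hp
          rw [if_pos h9]
          rw [show pvG l = [l, "!theme blueprint".toList] from by simp [pvG, hp]]
          rw [PySem.Chars.join_cons_cons, PySem.Chars.join_singleton]
          simp
        · have h9 : ¬ l.foldl pvNextSt 0 = 9 := fun hh => hp ((pvPred_iff l hdoml hnll).mpr hh)
          rw [if_neg h9]
          rw [show pvG l = [l] from by simp [pvG, hp]]
          rw [PySem.Chars.join_singleton]
          simp
    · -- single line
      rw [pvFoldl_line cs hmem, pvSplit_of_not_mem cs hmem]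
      rw [show ([cs].flatMap pvG) = pvG cs from by simp [pvG]]
      by_cases hp : pvPred cs = true
      · have h9 : cs.foldl pvNextSt 0 = 9 := (pvPred_iff cs hdom hmem).mp hp
        rw [show pvG cs = [cs, "!theme blueprint".toList] from by simp [pvG, hp]]
        rw [PySem.Chars.join_cons_cons, PySem.Chars.join_singleton]
        simp [h9]
      · have h9 : ¬ cs.foldl pvNextSt 0 = 9 := fun hh => hp ((pvPred_iff cs hdom hmem).mpr hh)
        rw [show pvG cs = [cs] from by simp [pvG, hp]]
        rw [PySem.Chars.join_singleton]
        simp [h9]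

-- ===== VERDICT (by name: the statement is the Claim_ definition above) =====
theorem add_blueprint_theme_spec : Claim_equal_add_blueprint_theme := by
  intro s hdom
  unfold Spec_add_blueprint_theme add_blueprint_theme add_blueprint_theme_alt
  by_cases hempty : s.toList = []
  · simp [hempty]
  · rw [if_neg hempty, if_neg hempty]
    by_cases hth : PySem.Str.isIn "!theme" s = true
    · have hth' : PySem.Chars.isIn ['!', 't', 'h', 'e', 'm', 'e'] s.toList = true := by simpa using hth
      simp [hth']
    · rw [if_neg hth, if_pos hth]
      have hdom' : ∀ c ∈ s.toList, pvDomChar c = true := by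
        intro c hc
        have : pvDomStr s = true := hdom
        rw [pvDomStr, List.all_eq_true] at this
        exact this c hc
      have hstep : (fun (acc : List (List Char)) line =>
          let acc' := acc ++ [line]
          if PySem.Chars.startswith (PySem.Chars.strip line) "@startuml".toList = true
          then acc' ++ ["!theme blueprint".toList] else acc')
          = fun acc line => acc ++ pvG line := by
        funext acc line
        by_cases hp : pvPred line = true
        · simp only [pvG, hp, if_pos hp]
          simp [pvPred] at hp
          simp [hp]
        · simp only [pvG, hp, if_neg hp]
          simp [pvPred] at hp
          simp [hp]
      have key := pvMain s.toList.length s.toList (le_refl _) hdom' []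
      show String.mk (PySem.Chars.join ['\n'] (List.foldl (fun (acc : List (List Char)) line =>
          let acc' := acc ++ [line]
          if PySem.Chars.startswith (PySem.Chars.strip line) "@startuml".toList = true
          then acc' ++ ["!theme blueprint".toList] else acc') [] (PySem.Chars.splitOn s.toList ['\n'])))
        = String.mk (if (List.foldl pvStep ([], 0) s.toList).2 = 9
            then (List.foldl pvStep ([], 0) s.toList).1 ++ ('\n' :: "!theme blueprint".toList)
            else (List.foldl pvStep ([], 0) s.toList).1)
      rw [hstep, pvSplitOn_eq, PySem.List.foldl_append_eq_flatMap]
      congr 1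
      simpa using key.symm
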